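-- pv_equiv track=rewrite | github.com/patelarjun66/DNAencoder | encoder.py | TranslateDNAToString
-- ===== SOURCE A (Python) =====
-- DNAdict = {'a':'TGAT','c':'TGAC','t':'TCTA','ACTA':'a','ACTG':'c','AGAT':'t'}
--
-- def TranslateDNAToString(str1):
--     out = ""
--     group = ''
--     #iterate through string in lengths of 4 and translate to corresponding dictionary values
--     for i in range(0,len(str1)):
--         if len(group)<4:
--             group+=str1[i]
--         if len(group)%4 == 0:
--             out+=DNAdict[group]
--             group = ''
--     return out
-- ===== SOURCE B (Python) =====
-- DNAdict = {'a':'TGAT','c':'TGAC','t':'TCTA','ACTA':'a','ACTG':'c','AGAT':'t'}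
--
-- def TranslateDNAToString(str1):
--     # walk the string in complete 4-char slices; a trailing partial group is dropped
--     parts = []
--     i = 0
--     while i + 4 <= len(str1):
--         parts.append(DNAdict[str1[i:i+4]])
--         i += 4
--     return ''.join(parts)
-- ===== Notes on version B (the rewrite author's own statement) =====
-- stated objective: simpler
-- what changed: Replaces the char-by-char group accumulator with a single while loop over complete 4-char slices, collecting translations in a list joined at the end.
import Mathlib
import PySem

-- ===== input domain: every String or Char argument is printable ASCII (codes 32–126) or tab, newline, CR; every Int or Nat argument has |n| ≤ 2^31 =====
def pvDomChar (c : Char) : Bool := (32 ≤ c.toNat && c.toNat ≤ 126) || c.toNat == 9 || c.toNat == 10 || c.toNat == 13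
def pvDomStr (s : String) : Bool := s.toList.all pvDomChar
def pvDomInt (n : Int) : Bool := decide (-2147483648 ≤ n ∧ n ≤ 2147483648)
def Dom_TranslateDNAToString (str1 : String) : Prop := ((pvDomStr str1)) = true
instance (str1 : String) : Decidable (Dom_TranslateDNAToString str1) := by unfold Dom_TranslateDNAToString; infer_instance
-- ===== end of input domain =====

-- B replaces A's char-by-char accumulator with a loop over complete 4-char slices joined at the end (objective: simpler).

-- ===== PORT A =====
-- the module-level dict; keys/values kept as List Char (exact bijection with the Python strings)
def DNAdict : PySem.Dict (List Char) (List Char) :=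
  PySem.Dict.ofList [("a".toList, "TGAT".toList), ("c".toList, "TGAC".toList),
    ("t".toList, "TCTA".toList), ("ACTA".toList, "a".toList),
    ("ACTG".toList, "c".toList), ("AGAT".toList, "t".toList)]

-- loop body of A: state (out, group), next char c (default value unreachable: i is in range;
-- the getD default [] of the dict lookup is unreachable under Pre_ — Python raises KeyError there)
def stepA (st : List Char × List Char) (c : Char) : List Char × List Char :=
  let group := if st.2.length < 4 then st.2 ++ [c] else st.2
  if group.length % 4 == 0 then (st.1 ++ PySem.Dict.getD DNAdict group [], ([] : List Char))
  else (st.1, group)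

def TranslateDNAToString (str1 : String) : String :=
  String.mk ((PySem.List.pyRange 0 (str1.toList.length : Int) 1).foldl
    (fun st i => stepA st (PySem.List.pyGetD str1.toList i ' ')) ([], [])).1

-- ===== PORT B =====
-- B's while loop `while i + 4 <= len: parts.append(DNAdict[str1[i:i+4]]); i += 4` consumes the
-- successive complete 4-char slices of str1; transcribed as recursion on the remaining suffix
-- (i + 4 ≤ len ↔ four chars remain; str1[i:i+4] is exactly the next four chars). Exact.
def altGo (cs : List Char) : List (List Char) :=
  match cs with
  | a :: b :: c :: d :: rest => PySem.Dict.getD DNAdict [a, b, c, d] [] :: altGo rest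
  | _ => []

def TranslateDNAToString_alt (str1 : String) : String :=
  String.mk (altGo str1.toList).flatten

-- ===== PRECONDITION & SPEC =====
-- Pre_ excludes exactly the inputs on which A raises KeyError: a string with a complete 4-char
-- group that is not a key of DNAdict (B raises the same KeyError there).
def goodChunks (cs : List Char) : Bool :=
  match cs with
  | a :: b :: c :: d :: rest => (PySem.Dict.get? DNAdict [a, b, c, d]).isSome && goodChunks rest
  | _ => true

def Pre_TranslateDNAToString (str1 : String) : Prop := goodChunks str1.toList = true
instance (str1 : String) : Decidable (Pre_TranslateDNAToString str1) := by
  unfold Pre_TranslateDNAToString; infer_instance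

def pvWitness_TranslateDNAToString : String := "ACTAACTGAGAT"

def Spec_TranslateDNAToString (str1 : String) (out : String) : Prop := out = TranslateDNAToString_alt str1
instance (str1 : String) (out : String) : Decidable (Spec_TranslateDNAToString str1 out) := by unfold Spec_TranslateDNAToString; infer_instance

-- ===== CLAIM (what is proved, stated in full; the proofs are below) =====
def Claim_equal_TranslateDNAToString : Prop := ∀ (str1 : String), Dom_TranslateDNAToString str1 → Pre_TranslateDNAToString str1 → Spec_TranslateDNAToString str1 (TranslateDNAToString str1)

-- ===== LEMMAS AND PROOFS =====

-- A's loop, run on the raw character list from any state with an empty group, appends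
-- exactly the flattened group translations of B.
theorem foldl_stepA (cs : List Char) : ∀ out : List Char,
    (cs.foldl stepA (out, [])).1 = out ++ (altGo cs).flatten := by
  match cs with
  | a :: b :: c :: d :: rest =>
    intro out
    have h4 : (rest.foldl stepA (out ++ PySem.Dict.getD DNAdict [a, b, c, d] [], [])).1
        = out ++ PySem.Dict.getD DNAdict [a, b, c, d] [] ++ (altGo rest).flatten :=
      foldl_stepA rest _
    simp [List.foldl, stepA, altGo, h4]
  | [] => intro out; simp [altGo]
  | [a] => intro out; simp [List.foldl, stepA, altGo]
  | [a, b] => intro out; simp [List.foldl, stepA, altGo]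
  | [a, b, c] => intro out; simp [List.foldl, stepA, altGo]

-- ===== VERDICT (by name: the statement is the Claim_ definition above) =====
theorem TranslateDNAToString_spec : Claim_equal_TranslateDNAToString := by
  intro str1 _ _
  unfold Spec_TranslateDNAToString TranslateDNAToString TranslateDNAToString_alt
  rw [PySem.List.foldl_pyRange_zero_pyGetD' (f := stepA)]
  rw [foldl_stepA str1.toList []]
  simp
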